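-- pv_equiv track=rewrite | github.com/teemollt/aps | pgrs/위장(lv2).py | solution
-- ===== SOURCE A (Python) =====
-- import itertools
--
-- def solution(clothes):
--     answer = 0
--     d = {}
--     for i in clothes:
--         if i[1] in d:
--             d[i[1]] += 1
--         else:
--             d[i[1]] = 1
--     def mtp(li):
--         rst = 1
--         for i in li:
--             rst *= i
--         return rst
--     cnt = list(d.values())
--     for i in range(len(cnt)):
--         comb = list(itertools.combinations(cnt, i+1))
--         for j in comb:
--             answer += mtp(j)
--     return answer
-- ===== SOURCE B (Python) =====
-- def solution(clothes):
--     counts = {}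
--     for item in clothes:
--         kind = item[1]
--         counts[kind] = counts.get(kind, 0) + 1
--     ans = 1
--     for c in counts.values():
--         ans *= c + 1
--     return ans - 1
-- ===== Notes on version B (the rewrite author's own statement) =====
-- stated objective: faster
-- what changed: Replaces the exponential enumeration of all non-empty combinations of category counts (summing their products) by the closed form: product of (count+1) over categories, minus 1.
import Mathlib
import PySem

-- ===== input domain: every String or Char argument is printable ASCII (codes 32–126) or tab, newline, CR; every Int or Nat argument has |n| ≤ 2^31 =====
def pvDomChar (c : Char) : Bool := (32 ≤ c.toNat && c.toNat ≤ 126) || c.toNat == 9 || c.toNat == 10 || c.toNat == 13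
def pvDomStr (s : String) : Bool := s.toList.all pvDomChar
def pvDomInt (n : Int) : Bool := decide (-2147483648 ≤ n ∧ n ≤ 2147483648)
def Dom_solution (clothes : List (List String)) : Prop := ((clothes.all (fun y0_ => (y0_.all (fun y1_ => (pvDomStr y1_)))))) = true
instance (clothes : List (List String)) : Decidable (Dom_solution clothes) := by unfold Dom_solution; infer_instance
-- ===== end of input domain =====

-- B replaces A's exponential enumeration of all non-empty combinations of category counts
-- by the closed form ∏(count+1) − 1; objective: faster (asymptotic).

-- ===== PORT A =====
-- mtp(li): rst = 1; for i in li: rst *= i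
def pvMtp (li : List Int) : Int := li.foldl (fun rst i => rst * i) 1

-- itertools.combinations(xs, k) (ported as the standard combinations recursion; only the
-- sum of the products of the combinations is used, so tuple order is irrelevant)
def pvCombs : List Int → Nat → List (List Int)
  | _, 0 => [[]]
  | [], _ + 1 => []
  | x :: xs, k + 1 => (pvCombs xs k).map (fun t => x :: t) ++ pvCombs xs (k + 1)

def solution (clothes : List (List String)) : Int :=
  let d := clothes.foldl (fun d i =>
    let key := (PySem.List.pyGet? i 1).getD ""   -- i[1]; Pre_ guarantees the index is in range
    if d.contains key then d.insert key (d.getD key 0 + 1) else d.insert key 1)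
    PySem.Dict.empty
  let cnt := d.values
  (List.range cnt.length).foldl (fun answer i =>
    (pvCombs cnt (i + 1)).foldl (fun a j => a + pvMtp j) answer) 0

-- ===== PORT B =====
def solution_alt (clothes : List (List String)) : Int :=
  let counts := clothes.foldl (fun d i =>
    let kind := (PySem.List.pyGet? i 1).getD ""  -- i[1]; Pre_ guarantees the index is in range
    d.insert kind (d.getD kind 0 + 1)) PySem.Dict.empty
  counts.values.foldl (fun ans c => ans * (c + 1)) 1 - 1

-- ===== PRECONDITION & SPEC =====
-- Pre_ excludes exactly the inputs where Python A raises IndexError on i[1] (an item with < 2 entries).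
def Pre_solution (clothes : List (List String)) : Prop := ∀ i ∈ clothes, 2 ≤ i.length
instance (clothes : List (List String)) : Decidable (Pre_solution clothes) := by unfold Pre_solution; infer_instance
def pvWitness_solution : List (List String) := [["a", "x"], ["b", "x"], ["c", "y"]]

def Spec_solution (clothes : List (List String)) (out : Int) : Prop := out = solution_alt clothes
instance (clothes : List (List String)) (out : Int) : Decidable (Spec_solution clothes out) := by unfold Spec_solution; infer_instance

-- ===== CLAIM (what is proved, stated in full; the proofs are below) =====
def Claim_equal_solution : Prop := ∀ (clothes : List (List String)), Dom_solution clothes → Pre_solution clothes → Spec_solution clothes (solution clothes)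

-- ===== LEMMAS AND PROOFS =====

-- sum of the products of the k-combinations of xs
def pvT (xs : List Int) (k : Nat) : Int := ((pvCombs xs k).map List.prod).sum

theorem pvMtp_eq_prod : pvMtp = List.prod := by
  funext li
  simp [pvMtp, List.prod_eq_foldl]

theorem pvCombs_eq_nil {xs : List Int} {k : Nat} (h : xs.length < k) : pvCombs xs k = [] := by
  induction xs generalizing k with
  | nil => cases k with
    | zero => omega
    | succ k => rfl
  | cons x xs ih =>
    cases k with
    | zero => omega
    | succ k =>
      simp at h
      simp [pvCombs, ih (k := k) (by omega), ih (k := k + 1) (by omega)]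

theorem pvT_zero (xs : List Int) : pvT xs 0 = 1 := by
  simp [pvT, pvCombs]

theorem pvT_high {xs : List Int} {k : Nat} (h : xs.length < k) : pvT xs k = 0 := by
  simp [pvT, pvCombs_eq_nil h]

theorem pvT_cons_succ (x : Int) (xs : List Int) (k : Nat) :
    pvT (x :: xs) (k + 1) = x * pvT xs k + pvT xs (k + 1) := by
  simp [pvT, pvCombs, List.sum_map_mul_left, Function.comp_def]

theorem pvSum_T (xs : List Int) :
    (∑ k ∈ Finset.range (xs.length + 1), pvT xs k) = (xs.map (fun c => c + 1)).prod := by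
  induction xs with
  | nil => simp [pvT_zero]
  | cons x xs ih =>
    rw [List.length_cons, Finset.sum_range_succ' (f := fun k => pvT (x :: xs) k)]
    simp only [pvT_cons_succ, pvT_zero]
    rw [Finset.sum_add_distrib, ← Finset.mul_sum]
    have h2 : (∑ i ∈ Finset.range (xs.length + 1), pvT xs (i + 1))
        = (∑ k ∈ Finset.range (xs.length + 1), pvT xs k) - 1 := by
      have := Finset.sum_range_succ' (f := fun k => pvT xs k) (n := xs.length + 1)
      rw [Finset.sum_range_succ (f := fun k => pvT xs k) (n := xs.length + 1)] at this
      rw [pvT_high (by omega)] at this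
      rw [pvT_zero] at this
      omega
    rw [ih] at *
    rw [h2]
    simp [List.prod_cons]
    ring

theorem pvFoldl_add {α : Type} (g : α → Int) (l : List α) (a : Int) :
    l.foldl (fun acc x => acc + g x) a = a + (l.map g).sum := by
  induction l generalizing a with
  | nil => simp
  | cons x l ih => simp [ih]; ring

theorem pvSum_range_map (f : Nat → Int) (n : Nat) :
    ((List.range n).map f).sum = ∑ i ∈ Finset.range n, f i := by
  induction n with
  | zero => simp
  | succ n ih => rw [List.range_succ, Finset.sum_range_succ]; simp [ih]

theorem pvFoldl_mul (l : List Int) (a : Int) :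
    l.foldl (fun ans c => ans * (c + 1)) a = a * (l.map (fun c => c + 1)).prod := by
  induction l generalizing a with
  | nil => simp
  | cons x l ih => simp [ih]; ring

theorem pvDict_step_eq :
    (fun (d : PySem.Dict String Int) (i : List String) =>
      let key := (PySem.List.pyGet? i 1).getD ""
      if d.contains key then d.insert key (d.getD key 0 + 1) else d.insert key 1)
    = (fun (d : PySem.Dict String Int) (i : List String) =>
      let kind := (PySem.List.pyGet? i 1).getD ""
      d.insert kind (d.getD kind 0 + 1)) := by
  funext d i
  simp only []
  by_cases h : d.contains ((PySem.List.pyGet? i 1).getD "")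
  · simp [h]
  · simp only [Bool.not_eq_true] at h
    rw [if_neg (by simp [h]), PySem.Dict.getD_of_not_contains]
    · norm_num
    · exact h

theorem pvMain (cnt : List Int) :
    (List.range cnt.length).foldl (fun answer i =>
      (pvCombs cnt (i + 1)).foldl (fun a j => a + pvMtp j) answer) 0
    = cnt.foldl (fun ans c => ans * (c + 1)) 1 - 1 := by
  have step : (fun (answer : Int) (i : Nat) =>
      (pvCombs cnt (i + 1)).foldl (fun a j => a + pvMtp j) answer)
      = fun answer i => answer + pvT cnt (i + 1) := by
    funext answer i
    rw [pvFoldl_add]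
    rw [pvMtp_eq_prod, pvT]
  rw [step, pvFoldl_add, pvSum_range_map, pvFoldl_mul]
  have h := Finset.sum_range_succ' (f := fun k => pvT cnt k) (n := cnt.length)
  rw [pvT_zero, ← pvSum_T] at *
  omega

-- ===== VERDICT (by name: the statement is the Claim_ definition above) =====
theorem solution_spec : Claim_equal_solution := by
  intro clothes _ _
  unfold Spec_solution solution solution_alt
  rw [pvDict_step_eq]
  exact pvMain _
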